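-- pv_equiv track=rewrite | github.com/ritu-thombre99/Number-System-Converter-and-Calculator | helper.py | check_sanity
-- ===== SOURCE A (Python) =====
-- def check_sanity(expr):
--     allowed = ['+','-','/','*','.']
--     for i in range(10):
--         allowed.append(str(i))
--     expr = list(expr)
--     for e in expr:
--         if e not in allowed:
--             return False
--     return True
-- ===== SOURCE B (Python) =====
-- def check_sanity(expr):
--     # Strip every allowed character from both ends: the result is empty
--     # exactly when expr contains only allowed characters.
--     return expr.strip('+-/*.0123456789') == ''
-- ===== Notes on version B (the rewrite author's own statement) =====
-- stated objective: simpler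
-- what changed: Replaces the allowed-list construction and per-character early-return loop with a single str.strip of the allowed characters: the expression is sane iff stripping them leaves the empty string.
import Mathlib
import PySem

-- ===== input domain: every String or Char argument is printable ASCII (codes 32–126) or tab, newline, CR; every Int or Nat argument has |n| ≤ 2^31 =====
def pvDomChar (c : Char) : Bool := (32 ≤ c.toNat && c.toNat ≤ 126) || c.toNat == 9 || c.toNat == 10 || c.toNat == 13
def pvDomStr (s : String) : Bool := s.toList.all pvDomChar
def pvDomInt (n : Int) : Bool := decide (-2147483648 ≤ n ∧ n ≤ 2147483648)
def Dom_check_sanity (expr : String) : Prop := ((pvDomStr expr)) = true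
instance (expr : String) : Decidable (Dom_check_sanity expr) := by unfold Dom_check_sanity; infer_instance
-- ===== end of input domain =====

-- B replaces A's allowed-list build + per-character early-return loop with a single
-- str.strip of the allowed characters compared against the empty string (simpler).


-- ===== PORT A =====
-- the for-loop with early 'return False', over list(expr) (1-char strings)
def checkSanityLoop (allowed : List String) : List Char → Bool
  | [] => true
  | e :: rest =>
    if !(allowed.contains (String.ofList [e])) then false
    else checkSanityLoop allowed rest

def check_sanity (expr : String) : Bool :=
  let allowed : List String := ["+", "-", "/", "*", "."]
  let allowed := (PySem.List.pyRange 0 10 1).foldl (fun a i => a ++ [PySem.Int.toStr i]) allowed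
  checkSanityLoop allowed expr.toList

-- ===== PORT B =====
def check_sanity_alt (expr : String) : Bool :=
  PySem.Str.stripChars expr "+-/*.0123456789" == ""

-- ===== PRECONDITION & SPEC =====
def Spec_check_sanity (expr : String) (out : Bool) : Prop := out = check_sanity_alt expr
instance (expr : String) (out : Bool) : Decidable (Spec_check_sanity expr out) := by unfold Spec_check_sanity; infer_instance

-- ===== CLAIM (what is proved, stated in full; the proofs are below) =====
def Claim_equal_check_sanity : Prop := ∀ (expr : String), Dom_check_sanity expr → Spec_check_sanity expr (check_sanity expr)

-- ===== LEMMAS AND PROOFS =====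
def pvAllowedStrs : List String :=
  (PySem.List.pyRange 0 10 1).foldl (fun a i => a ++ [PySem.Int.toStr i])
    ["+", "-", "/", "*", "."]

theorem ofList_single_inj (e c : Char) : (String.ofList [e] = String.ofList [c]) ↔ e = c := by
  rw [← String.toList_inj, String.toList_ofList, String.toList_ofList]
  simp

theorem pvChar_mem_iff (e : Char) :
    pvAllowedStrs.contains (String.ofList [e]) = ("+-/*.0123456789".toList.contains e) := by
  have h : pvAllowedStrs = [String.ofList ['+'], String.ofList ['-'], String.ofList ['/'],
      String.ofList ['*'], String.ofList ['.'], String.ofList ['0'], String.ofList ['1'],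
      String.ofList ['2'], String.ofList ['3'], String.ofList ['4'], String.ofList ['5'],
      String.ofList ['6'], String.ofList ['7'], String.ofList ['8'], String.ofList ['9']] := by
    decide
  rw [h]
  simp only [List.contains_eq_mem, List.mem_cons, List.not_mem_nil, or_false, decide_eq_decide,
    ofList_single_inj]
  show _ ↔ e ∈ ['+','-','/','*','.','0','1','2','3','4','5','6','7','8','9']
  simp

-- A's loop returns true iff every character is an allowed character
theorem loop_eq_all (l : List Char) :
    checkSanityLoop pvAllowedStrs l = l.all (fun e => "+-/*.0123456789".toList.contains e) := by
  induction l with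
  | nil => rfl
  | cons e rest ih =>
    rw [checkSanityLoop, pvChar_mem_iff, List.all_cons, ← ih]
    rcases h : ("+-/*.0123456789".toList.contains e) with _ | _ <;> simp

-- stripping all of chars from both ends yields [] iff every character of s is in chars
theorem stripChars_eq_nil_iff (s chars : List Char) :
    PySem.Chars.stripChars s chars = [] ↔ ∀ c ∈ s, chars.contains c = true := by
  unfold PySem.Chars.stripChars
  rw [List.reverse_eq_nil_iff, List.dropWhile_eq_nil_iff]
  simp only [List.mem_reverse]
  constructor
  · intro h c hc
    have hsplit : s = s.takeWhile (fun c => chars.contains c) ++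
        s.dropWhile (fun c => chars.contains c) := (List.takeWhile_append_dropWhile).symm
    rw [hsplit] at hc
    rcases List.mem_append.mp hc with h1 | h2
    · exact List.mem_takeWhile_imp h1
    · exact h c h2
  · intro h c hc
    exact h c (List.dropWhile_subset _ hc)

-- ===== VERDICT (by name: the statement is the Claim_ definition above) =====
theorem check_sanity_spec : Claim_equal_check_sanity := by
  intro expr _
  unfold Spec_check_sanity check_sanity check_sanity_alt
  show checkSanityLoop pvAllowedStrs expr.toList = _
  rw [loop_eq_all]
  rw [Bool.eq_iff_iff, beq_iff_eq, ← String.toList_inj, PySem.Str.toList_stripChars]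
  show _ ↔ _ = ([] : List Char)
  rw [stripChars_eq_nil_iff, List.all_eq_true]
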